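-- pv_equiv track=rewrite | github.com/SnowieS2026/research-service | tools/research-tool/research.py | extract_relevant_snippets
-- ===== SOURCE A (Python) =====
-- def extract_relevant_snippets(text, query_terms, max_chars):
--     """
--     Pull out sentences/paragraphs from text that mention query terms.
--     Returns truncated content focused on relevance.
--     """
--     if not text:
--         return ""
--     text_lower = text.lower()
--     query_lower = query_terms.lower()
--
--     # Find paragraphs containing any query term
--     paragraphs = [p.strip() for p in text.split("\n") if p.strip()]
--     scored = []
--     for para in paragraphs:
--         score = sum(1 for term in query_lower.split() if term in para.lower())
--         if score > 0:
--             scored.append((score, para))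
--
--     scored.sort(key=lambda x: x[0], reverse=True)
--
--     result_parts = []
--     chars = 0
--     for _, para in scored:
--         if chars + len(para) > max_chars:
--             remaining = max_chars - chars
--             if remaining > 100:
--                 result_parts.append(para[:remaining] + "…")
--             break
--         result_parts.append(para)
--         chars += len(para)
--
--     return "\n\n".join(result_parts)
-- ===== SOURCE B (Python) =====
-- def _take(ordered, budget):
--     """Recursively take leading paragraphs that fit, truncating the first overflow."""
--     if not ordered:
--         return []
--     para = ordered[0]
--     if len(para) <= budget:
--         return [para] + _take(ordered[1:], budget - len(para))
--     if budget > 100: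
--         return [para[:budget] + "…"]
--     return []
--
--
-- def extract_relevant_snippets(text, query_terms, max_chars):
--     """Counting-sort by score buckets + recursive budgeted prefix selection."""
--     if not text:
--         return ""
--     terms = query_terms.lower().split()
--     paragraphs = [p.strip() for p in text.split("\n") if p.strip()]
--
--     # Buckets keyed by score, filled in original paragraph order: walking the
--     # scores high to low reproduces a stable descending sort.
--     buckets = {}
--     for para in paragraphs:
--         pl = para.lower()
--         score = sum(t in pl for t in terms)
--         if score:
--             buckets.setdefault(score, []).append(para)
--
--     ordered = [p for s in range(len(terms), 0, -1) for p in buckets.get(s, [])]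
--     return "\n\n".join(_take(ordered, max_chars))
-- ===== Notes on version B (the rewrite author's own statement) =====
-- stated objective: alternative
-- what changed: Replaces the comparison sort with a counting/bucket pass (score-keyed buckets filled in original order, emitted by walking scores from len(terms) down to 1, reproducing the stable descending sort) and replaces the iterative accumulate-and-break loop with a recursive budgeted prefix selection that builds the result front-to-back while decrementing the remaining budget.
import Mathlib
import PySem

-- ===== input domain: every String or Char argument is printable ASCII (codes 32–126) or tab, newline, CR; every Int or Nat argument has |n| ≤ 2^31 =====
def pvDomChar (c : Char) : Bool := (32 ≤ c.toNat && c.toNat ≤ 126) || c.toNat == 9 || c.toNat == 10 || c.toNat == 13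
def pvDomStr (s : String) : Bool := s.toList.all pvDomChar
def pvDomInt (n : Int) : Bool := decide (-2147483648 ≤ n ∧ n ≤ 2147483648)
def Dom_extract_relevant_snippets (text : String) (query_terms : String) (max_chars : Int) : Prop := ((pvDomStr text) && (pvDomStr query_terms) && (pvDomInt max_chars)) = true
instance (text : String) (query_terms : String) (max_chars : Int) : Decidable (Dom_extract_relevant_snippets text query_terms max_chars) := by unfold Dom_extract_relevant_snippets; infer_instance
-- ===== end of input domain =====

-- B replaces A's comparison sort by a counting/bucket pass (score-keyed buckets walked
-- from the highest score down, reproducing the stable descending sort) and A's iterative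
-- accumulate-and-break loop by a recursive budgeted prefix selection; objective: alternative.

-- ===== PORT A =====
-- A's score of one paragraph: sum(1 for term in query_lower.split() if term in para.lower())
def pvScore (terms : List String) (para : String) : Int :=
  terms.foldl (fun acc term => if PySem.Str.isIn term (PySem.Str.lower para) then acc + 1 else acc) 0

-- A's greedy accumulation loop over the (score, para) pairs, with its break
def pvGreedyA : List (Int × String) → Int → List String → Int → List String
  | [], _, parts, _ => parts
  | (_, para) :: rest, maxc, parts, chars =>
    if chars + PySem.Str.len para > maxc then
      if maxc - chars > 100 then
        parts ++ [PySem.Str.join "" [PySem.Str.slice para none (some (maxc - chars)), "…"]]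
      else parts
    else pvGreedyA rest maxc (parts ++ [para]) (chars + PySem.Str.len para)

def extract_relevant_snippets (text : String) (query_terms : String) (max_chars : Int) : String :=
  if text = "" then ""
  else
    let query_lower := PySem.Str.lower query_terms
    let paragraphs := (((PySem.Str.split? text "\n").getD []).map PySem.Str.strip).filter (fun p => p != "")
    let scored := paragraphs.foldl (fun acc para =>
        if pvScore (PySem.Str.split₀ query_lower) para > 0 then
          acc ++ [(pvScore (PySem.Str.split₀ query_lower) para, para)]
        else acc) []
    let scoredSorted := PySem.List.sorted scored (fun x => x.1) true
    PySem.Str.join "\n\n" (pvGreedyA scoredSorted max_chars [] 0)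

-- ===== PORT B =====
-- B's recursive _take: keep leading paragraphs that fit the budget, truncate the first overflow
def pvTake : List String → Int → List String
  | [], _ => []
  | para :: rest, budget =>
    if PySem.Str.len para ≤ budget then
      para :: pvTake rest (budget - PySem.Str.len para)
    else if budget > 100 then
      [PySem.Str.join "" [PySem.Str.slice para none (some budget), "…"]]
    else []

def extract_relevant_snippets_alt (text : String) (query_terms : String) (max_chars : Int) : String :=
  if text = "" then ""
  else
    let terms := PySem.Str.split₀ (PySem.Str.lower query_terms)
    let paragraphs := (((PySem.Str.split? text "\n").getD []).map PySem.Str.strip).filter (fun p => p != "")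
    -- buckets.setdefault(score, []).append(para), score = sum(t in pl for t in terms)
    let buckets := paragraphs.foldl (fun d para =>
        let score : Int := (terms.countP (fun t => PySem.Str.isIn t (PySem.Str.lower para)) : Int)
        if score != 0 then d.modify score [] (· ++ [para]) else d)
        (PySem.Dict.empty : PySem.Dict Int (List String))
    -- [p for s in range(len(terms), 0, -1) for p in buckets.get(s, [])]
    let ordered := (PySem.List.pyRange (PySem.List.len terms) 0 (-1)).flatMap (fun s => buckets.getD s [])
    PySem.Str.join "\n\n" (pvTake ordered max_chars)

-- ===== PRECONDITION & SPEC =====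
def Spec_extract_relevant_snippets (text : String) (query_terms : String) (max_chars : Int) (out : String) : Prop := out = extract_relevant_snippets_alt text query_terms max_chars
instance (text : String) (query_terms : String) (max_chars : Int) (out : String) : Decidable (Spec_extract_relevant_snippets text query_terms max_chars out) := by unfold Spec_extract_relevant_snippets; infer_instance

-- ===== CLAIM (what is proved, stated in full; the proofs are below) =====
def Claim_equal_extract_relevant_snippets : Prop := ∀ (text : String) (query_terms : String) (max_chars : Int), Dom_extract_relevant_snippets text query_terms max_chars → Spec_extract_relevant_snippets text query_terms max_chars (extract_relevant_snippets text query_terms max_chars)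

-- ===== LEMMAS AND PROOFS =====

-- A's iterative greedy loop equals B's recursive prefix selection on the remaining budget
theorem pvGreedyA_eq_pvTake (items : List (Int × String)) (maxc : Int) (parts : List String) (chars : Int) :
    pvGreedyA items maxc parts chars = parts ++ pvTake (items.map (·.2)) (maxc - chars) := by
  induction items generalizing parts chars with
  | nil => simp [pvGreedyA, pvTake]
  | cons p rest ih =>
    obtain ⟨s, para⟩ := p
    simp only [pvGreedyA, pvTake, List.map_cons]
    by_cases h : chars + PySem.Str.len para > maxc
    · have h' : ¬ PySem.Str.len para ≤ maxc - chars := by omega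
      simp only [h, if_true, h', if_false]
      split_ifs <;> simp
    · have h' : PySem.Str.len para ≤ maxc - chars := by omega
      simp only [h, if_false, h', if_true]
      rw [ih]
      have harg : maxc - (chars + PySem.Str.len para) = maxc - chars - PySem.Str.len para := by ring
      rw [harg]
      simp

-- B's bucket-fold step equals the same step written with pvScore and a > 0 test
theorem bucketStep_eq (terms : List String) :
    (fun (d : PySem.Dict Int (List String)) para =>
        let score : Int := (terms.countP (fun t => PySem.Str.isIn t (PySem.Str.lower para)) : Int)
        if score != 0 then d.modify score [] (· ++ [para]) else d)
    = (fun (d : PySem.Dict Int (List String)) para =>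
        if pvScore terms para > 0 then d.modify (pvScore terms para) [] (· ++ [para]) else d) := by
  funext d para
  have hs : pvScore terms para = (terms.countP (fun t => PySem.Str.isIn t (PySem.Str.lower para)) : Int) := by
    unfold pvScore
    simpa only [zero_add] using
      PySem.List.foldl_if_add_one (fun t => PySem.Str.isIn t (PySem.Str.lower para)) terms 0
  simp only [hs]
  set c := terms.countP (fun t => PySem.Str.isIn t (PySem.Str.lower para)) with hc
  have : ((c : Int) != 0) = decide ((0 : Int) < (c : Int)) := by
    cases c with
    | zero => simp
    | succ n => simp; omega
  simp [this]

-- insertBy passes over a block it does not insert before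
theorem insertBy_append_of_not_before {α : Type} (before : α → α → Bool) (x : α) (ys zs : List α)
    (h : ∀ y ∈ ys, before x y = false) :
    PySem.List.insertBy before x (ys ++ zs) = ys ++ PySem.List.insertBy before x zs := by
  induction ys with
  | nil => rfl
  | cons y ys ih =>
    have hy : before x y = false := h y List.mem_cons_self
    simp only [List.cons_append, PySem.List.insertBy, hy, Bool.false_eq_true, if_false]
    exact congrArg (y :: ·) (ih fun a ha => h a (List.mem_cons_of_mem _ ha))

-- insertBy puts x in front of a block it precedes entirely
theorem insertBy_eq_cons_of_before {α : Type} (before : α → α → Bool) (x : α) (zs : List α)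
    (h : ∀ z ∈ zs, before x z = true) :
    PySem.List.insertBy before x zs = x :: zs := by
  cases zs with
  | nil => rfl
  | cons z zs => simp [PySem.List.insertBy, h z List.mem_cons_self]

-- one insertion into the bucket concatenation lands at the end of its own bucket
theorem insertBy_flatMap {α : Type} (key : α → Int) (x : α) (ss : List Int) (F : Int → List α)
    (hss : ss.Pairwise (· > ·)) (hx : key x ∈ ss) (hF : ∀ s ∈ ss, ∀ y ∈ F s, key y = s) :
    PySem.List.insertBy (fun a b => decide (key b < key a)) x (ss.flatMap F)
      = ss.flatMap (fun s => F s ++ if key x == s then [x] else []) := by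
  induction ss with
  | nil => cases hx
  | cons s ss ih =>
    have hgt : ∀ t ∈ ss, t < s := fun t ht => (List.pairwise_cons.1 hss).1 t ht
    have hFs : ∀ y ∈ F s, key y = s := hF s List.mem_cons_self
    by_cases hxe : key x = s
    · have h1 : PySem.List.insertBy (fun a b => decide (key b < key a)) x (F s ++ ss.flatMap F)
          = F s ++ PySem.List.insertBy (fun a b => decide (key b < key a)) x (ss.flatMap F) :=
        insertBy_append_of_not_before _ _ _ _ (fun y hy => by
          have := hFs y hy; simp [this, hxe])
      have h2 : PySem.List.insertBy (fun a b => decide (key b < key a)) x (ss.flatMap F)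
          = x :: ss.flatMap F :=
        insertBy_eq_cons_of_before _ _ _ (fun z hz => by
          obtain ⟨t, ht, hzt⟩ := List.mem_flatMap.1 hz
          have := hF t (List.mem_cons_of_mem _ ht) z hzt
          have := hgt t ht
          simp; omega)
      have h3 : ss.flatMap (fun t => F t ++ if key x == t then [x] else []) = ss.flatMap F := by
        refine List.flatMap_congr (fun t ht => ?_)
        have : (key x == t) = false := by
          have := hgt t ht
          simp only [beq_eq_false_iff_ne, ne_eq]
          omega
        simp [this]
      simp only [List.flatMap_cons, h1, h2, h3]
      have : (key x == s) = true := by simp [hxe]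
      simp [this]
    · have hx' : key x ∈ ss := by
        rcases List.mem_cons.1 hx with h | h
        · exact absurd h hxe
        · exact h
      have hxlt : key x < s := hgt _ hx'
      have h1 : PySem.List.insertBy (fun a b => decide (key b < key a)) x (F s ++ ss.flatMap F)
          = F s ++ PySem.List.insertBy (fun a b => decide (key b < key a)) x (ss.flatMap F) :=
        insertBy_append_of_not_before _ _ _ _ (fun y hy => by
          have := hFs y hy; simp; omega)
      have hbe : (key x == s) = false := by simp [hxe]
      simp only [List.flatMap_cons, h1, hbe, Bool.false_eq_true, if_false, List.append_nil]
      rw [ih ((List.pairwise_cons.1 hss).2) hx' (fun t ht => hF t (List.mem_cons_of_mem _ ht))]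

-- the stable reverse sort by an Int key IS the bucket concatenation in strictly descending key order
theorem sorted_rev_eq_flatMap_filter {α : Type} (key : α → Int) (xs : List α) (ss : List Int)
    (hss : ss.Pairwise (· > ·)) (hmem : ∀ x ∈ xs, key x ∈ ss) :
    PySem.List.sorted xs key true = ss.flatMap (fun s => xs.filter (fun x => key x == s)) := by
  rw [PySem.List.sorted_rev_eq_foldl_insertBy]
  induction xs using List.reverseRecOn with
  | nil => simp
  | append_singleton xs x ih =>
    rw [List.foldl_append, List.foldl_cons, List.foldl_nil]
    rw [ih (fun y hy => hmem y (List.mem_append_left _ hy))]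
    rw [insertBy_flatMap key x ss _ hss (hmem x (List.mem_append_right _ List.mem_cons_self))
      (fun s hs y hy => by simpa using (List.of_mem_filter hy))]
    refine List.flatMap_congr fun s hs => ?_
    rw [List.filter_append]
    simp [List.filter_singleton]

theorem pvScore_eq_countP (terms : List String) (para : String) :
    pvScore terms para = (terms.countP (fun t => PySem.Str.isIn t (PySem.Str.lower para)) : Int) := by
  unfold pvScore
  simpa only [zero_add] using
    PySem.List.foldl_if_add_one (fun t => PySem.Str.isIn t (PySem.Str.lower para)) terms 0

-- one bucket of B's dict is the corresponding score-filter of A's scored list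
theorem bucket_getD (terms : List String) (paragraphs : List String) (s : Int) :
    (paragraphs.foldl (fun d para =>
        if pvScore terms para > 0 then d.modify (pvScore terms para) [] (· ++ [para]) else d)
        (PySem.Dict.empty : PySem.Dict Int (List String))).getD s []
      = ((((paragraphs.filter (fun para => decide (pvScore terms para > 0))).map
            (fun para => (pvScore terms para, para))).filter (fun p => p.1 == s)).map (·.2)) := by
  have h1 := PySem.List.foldl_ite_eq_foldl_filter (fun para => pvScore terms para > 0)
    (fun (d : PySem.Dict Int (List String)) para => d.modify (pvScore terms para) [] (· ++ [para]))
    paragraphs PySem.Dict.empty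
  simp only at h1
  rw [h1, ← List.foldl_map (f := fun para => (pvScore terms para, para))
    (g := fun (d : PySem.Dict Int (List String)) (p : Int × String) => d.modify p.1 [] (· ++ [p.2]))]
  rw [PySem.Dict.getD_foldl_modify_append]
  simp

-- the heart: A's sorted paragraph order equals B's high-to-low bucket walk
theorem ordering_eq (terms paragraphs : List String) :
    (PySem.List.sorted (paragraphs.foldl (fun acc para =>
        if pvScore terms para > 0 then acc ++ [(pvScore terms para, para)] else acc) [])
        (fun x => x.1) true).map (·.2)
    = (PySem.List.pyRange (PySem.List.len terms) 0 (-1)).flatMap (fun s =>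
        (paragraphs.foldl (fun d para =>
          if pvScore terms para > 0 then d.modify (pvScore terms para) [] (· ++ [para]) else d)
          (PySem.Dict.empty : PySem.Dict Int (List String))).getD s []) := by
  have hscored : paragraphs.foldl (fun acc para =>
      if pvScore terms para > 0 then acc ++ [(pvScore terms para, para)] else acc) []
      = ((paragraphs.filter (fun para => decide (pvScore terms para > 0))).map
          (fun para => (pvScore terms para, para))) := by
    simpa using PySem.List.foldl_append_ite (fun para => pvScore terms para > 0)
      (fun para => (pvScore terms para, para)) paragraphs []
  have hordered : (PySem.List.pyRange (PySem.List.len terms) 0 (-1)).flatMap (fun s =>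
      (paragraphs.foldl (fun d para =>
        if pvScore terms para > 0 then d.modify (pvScore terms para) [] (· ++ [para]) else d)
        (PySem.Dict.empty : PySem.Dict Int (List String))).getD s [])
      = (PySem.List.pyRange (PySem.List.len terms) 0 (-1)).flatMap (fun s =>
          ((((paragraphs.filter (fun para => decide (pvScore terms para > 0))).map
              (fun para => (pvScore terms para, para))).filter (fun p => p.1 == s)).map (·.2))) :=
    List.flatMap_congr fun s _ => bucket_getD terms paragraphs s
  rw [hscored, hordered]
  have hss : (PySem.List.pyRange (PySem.List.len terms) 0 (-1)).Pairwise (· > ·) := by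
    rw [PySem.List.pyRange_neg_one_eq_reverse]
    rw [List.pairwise_reverse]
    exact PySem.List.pairwise_lt_pyRange_one _ _
  have hmem : ∀ p ∈ (paragraphs.filter (fun para => decide (pvScore terms para > 0))).map
      (fun para => (pvScore terms para, para)),
      (fun (x : Int × String) => x.1) p ∈ PySem.List.pyRange (PySem.List.len terms) 0 (-1) := by
    intro p hp
    obtain ⟨para, hpf, rfl⟩ := List.mem_map.1 hp
    have hpos : 0 < pvScore terms para := by
      have := List.of_mem_filter hpf
      simpa using this
    have hle : pvScore terms para ≤ (terms.length : Int) := by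
      rw [pvScore_eq_countP]
      exact_mod_cast List.countP_le_length
    rw [PySem.List.pyRange_neg_one_eq_reverse, List.mem_reverse, PySem.List.mem_pyRange_one]
    simp only [PySem.List.len_eq]
    omega
  rw [sorted_rev_eq_flatMap_filter (fun (x : Int × String) => x.1)
    ((paragraphs.filter (fun para => decide (pvScore terms para > 0))).map
      (fun para => (pvScore terms para, para)))
    (PySem.List.pyRange (PySem.List.len terms) 0 (-1)) hss hmem]
  rw [List.map_flatMap]

-- ===== VERDICT (by name: the statement is the Claim_ definition above) =====
theorem extract_relevant_snippets_spec : Claim_equal_extract_relevant_snippets := by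
  intro text query_terms max_chars _
  unfold Spec_extract_relevant_snippets extract_relevant_snippets extract_relevant_snippets_alt
  by_cases h : text = ""
  · simp [h]
  · simp only [h, if_false]
    rw [pvGreedyA_eq_pvTake, bucketStep_eq, ordering_eq]
    simp
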